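-- pv_equiv track=rewrite | github.com/giorgioskij/NLP-coreference-resolution | hw3/stud/implementation.py | predict_entities
-- ===== SOURCE A (Python) =====
-- def predict_entities(entities, toks):
--     offset = 0
--     entities = []
--     for tok in toks:
--         if tok != "" and tok[0].isupper():
--             entities.append((tok, offset))
--         offset += len(tok) + 1
--     return entities
-- ===== SOURCE B (Python) =====
-- def predict_entities(entities, toks):
--     # pass 1: table of each token's starting character offset
--     offsets = []
--     pos = 0
--     for tok in toks:
--         offsets.append(pos)
--         pos += len(tok) + 1
--     # pass 2: keep capitalized tokens with their offsets
--     return [(tok, off) for tok, off in zip(toks, offsets) if tok and tok[0].isupper()]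
-- ===== Notes on version B (the rewrite author's own statement) =====
-- stated objective: alternative
-- what changed: B separates the computation into two passes: it first materialises a prefix-sum table of token start offsets, then zips tokens with offsets and keeps capitalized ones via a comprehension, instead of A's single loop carrying an offset accumulator and appending as it goes.
import Mathlib
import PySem

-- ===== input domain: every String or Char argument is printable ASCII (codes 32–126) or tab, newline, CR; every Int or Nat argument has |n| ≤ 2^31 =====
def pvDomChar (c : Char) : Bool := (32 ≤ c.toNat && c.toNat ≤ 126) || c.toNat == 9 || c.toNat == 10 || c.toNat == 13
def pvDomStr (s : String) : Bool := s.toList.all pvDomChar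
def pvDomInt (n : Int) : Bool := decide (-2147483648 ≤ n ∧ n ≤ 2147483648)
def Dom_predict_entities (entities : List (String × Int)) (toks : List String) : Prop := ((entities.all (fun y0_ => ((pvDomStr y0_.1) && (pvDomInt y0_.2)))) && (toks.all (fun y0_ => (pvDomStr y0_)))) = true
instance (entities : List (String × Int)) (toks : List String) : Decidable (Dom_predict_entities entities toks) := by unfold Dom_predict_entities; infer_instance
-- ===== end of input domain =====

-- B changes the decomposition only (two passes: offset table, then zip+filter); same O(n) cost.

-- `tok != "" and tok[0].isupper()` (empty string is falsy; tok[0] exists when tok ≠ "")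
def pvCapHead (tok : String) : Bool :=
  match tok.toList with
  | [] => false
  | c :: _ => PySem.Chars.isupper c

-- ===== PORT A =====
-- single loop carrying (offset, accumulated entities); the `entities` parameter is rebound and ignored
def pvStepA (st : Int × List (String × Int)) (tok : String) : Int × List (String × Int) :=
  let st' := if pvCapHead tok then (st.1, st.2 ++ [(tok, st.1)]) else st
  (st'.1 + PySem.Str.len tok + 1, st'.2)

def predict_entities (entities : List (String × Int)) (toks : List String) : List (String × Int) :=
  (toks.foldl pvStepA (0, [])).2

-- ===== PORT B =====
-- pass 1: table of token start offsets
def pvOffsets : List String → Int → List Int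
  | [], _ => []
  | tok :: rest, pos => pos :: pvOffsets rest (pos + PySem.Str.len tok + 1)

-- pass 2: zip with offsets, keep capitalized tokens
def predict_entities_alt (entities : List (String × Int)) (toks : List String) : List (String × Int) :=
  (toks.zip (pvOffsets toks 0)).filter (fun p => pvCapHead p.1)

-- ===== PRECONDITION & SPEC =====
def Spec_predict_entities (entities : List (String × Int)) (toks : List String) (out : List (String × Int)) : Prop := out = predict_entities_alt entities toks
instance (entities : List (String × Int)) (toks : List String) (out : List (String × Int)) : Decidable (Spec_predict_entities entities toks out) := by unfold Spec_predict_entities; infer_instance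

-- ===== CLAIM (what is proved, stated in full; the proofs are below) =====
def Claim_equal_predict_entities : Prop := ∀ (entities : List (String × Int)) (toks : List String), Dom_predict_entities entities toks → Spec_predict_entities entities toks (predict_entities entities toks)

-- ===== LEMMAS AND PROOFS =====
theorem pv_fold_eq (toks : List String) : ∀ (off : Int) (acc : List (String × Int)),
    (toks.foldl pvStepA (off, acc)).2
      = acc ++ (toks.zip (pvOffsets toks off)).filter (fun p => pvCapHead p.1) := by
  induction toks with
  | nil => intro off acc; simp [pvOffsets]
  | cons t rest ih =>
    intro off acc
    by_cases h : pvCapHead t = true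
    · simp [pvOffsets, List.foldl_cons, pvStepA, h, ih]
    · simp only [Bool.not_eq_true] at h
      simp [pvOffsets, List.foldl_cons, pvStepA, h, ih]

-- ===== VERDICT (by name: the statement is the Claim_ definition above) =====
theorem predict_entities_spec : Claim_equal_predict_entities := by
  intro entities toks _
  unfold Spec_predict_entities predict_entities predict_entities_alt
  simpa using pv_fold_eq toks 0 []
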